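-- pv_equiv track=rewrite | github.com/mayanksinghk/Assignment | Machine-Learning-Assignments/Assignment 2/part d/neural_d.py | ReverseOneHotEncoding
-- ===== SOURCE A (Python) =====
-- def ReverseOneHotEncoding(t):
--     max = t[0]
--     index = 0
--     for i in range(10):
--         if(t[i] > max):
--             max = t[i]
--             index = i
--     return index
-- ===== SOURCE B (Python) =====
-- def ReverseOneHotEncoding(t):
--     # Divide-and-conquer tournament argmax over t[0:10]: recursively find the
--     # (max value, earliest index) of each half and merge, preferring the left
--     # half on ties (>=), which reproduces first-occurrence semantics.
--     def best(lo, hi):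
--         if hi - lo == 1:
--             return (t[lo], lo)
--         mid = (lo + hi) // 2
--         lv, li = best(lo, mid)
--         rv, ri = best(mid, hi)
--         if lv >= rv:
--             return (lv, li)
--         return (rv, ri)
--     return best(0, 10)[1]
-- ===== Notes on version B (the rewrite author's own statement) =====
-- stated objective: alternative
-- what changed: Replaces A's single fused linear scan tracking a running max and index with a divide-and-conquer tournament: recursively compute (max, earliest index) of each half of t[0:10] and merge with a left-biased >= comparison.
import Mathlib
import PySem

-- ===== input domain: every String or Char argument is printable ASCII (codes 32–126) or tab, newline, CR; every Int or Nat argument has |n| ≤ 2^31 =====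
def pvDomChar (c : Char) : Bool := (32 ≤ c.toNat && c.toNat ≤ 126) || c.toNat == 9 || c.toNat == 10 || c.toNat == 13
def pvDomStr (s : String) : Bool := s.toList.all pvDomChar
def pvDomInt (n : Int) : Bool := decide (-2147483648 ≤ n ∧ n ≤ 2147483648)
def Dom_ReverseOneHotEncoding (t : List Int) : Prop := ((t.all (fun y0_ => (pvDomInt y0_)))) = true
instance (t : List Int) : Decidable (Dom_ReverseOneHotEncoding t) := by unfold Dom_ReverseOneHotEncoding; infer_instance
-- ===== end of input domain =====

-- B replaces A's fused linear scan (running max + index) by a divide-and-conquer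
-- tournament over t[0:10] merging (max, earliest index) pairs of halves; return value only.

-- ===== PORT A =====
-- literal port of A: fused loop over range(10), state (max, index), strict '>' update
def ReverseOneHotEncoding (t : List Int) : Int :=
  ((PySem.List.pyRange 0 10 1).foldl
    (fun (s : Int × Int) j =>
      let v := PySem.List.pyGetD t j 0
      if v > s.1 then (v, j) else s)
    (PySem.List.pyGetD t 0 0, 0)).2

-- ===== PORT B =====
-- literal port of Source B's best(lo, hi): tournament on the half-open range [lo, hi).
-- Python's base test is 'hi - lo == 1'; recursion only reaches lo < hi, where the
-- Lean guard 'hi - lo ≤ 1' (needed for Nat-subtraction termination) coincides.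
def pvBest (t : List Int) (lo hi : Nat) : Int × Int :=
  if hi - lo ≤ 1 then (PySem.List.pyGetD t lo 0, (lo : Int))
  else
    -- (lo + hi) / 2 on Nat is exactly Python's (lo + hi) // 2: both bounds are nonnegative
    let mid := (lo + hi) / 2
    let l := pvBest t lo mid
    let r := pvBest t mid hi
    if l.1 ≥ r.1 then l else r
termination_by hi - lo
decreasing_by all_goals omega

def ReverseOneHotEncoding_alt (t : List Int) : Int :=
  (pvBest t 0 10).2

-- ===== PRECONDITION & SPEC =====
-- Pre_ excludes exactly the inputs with fewer than 10 elements, where A (and B) raise IndexError at t[i].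
def Pre_ReverseOneHotEncoding (t : List Int) : Prop := 10 ≤ t.length
instance (t : List Int) : Decidable (Pre_ReverseOneHotEncoding t) := by
  unfold Pre_ReverseOneHotEncoding; infer_instance

def pvWitness_ReverseOneHotEncoding : List Int := [3, 1, 4, 1, 5, 9, 2, 6, 5, 3]

def Spec_ReverseOneHotEncoding (t : List Int) (out : Int) : Prop := out = ReverseOneHotEncoding_alt t
instance (t : List Int) (out : Int) : Decidable (Spec_ReverseOneHotEncoding t out) := by unfold Spec_ReverseOneHotEncoding; infer_instance

-- ===== CLAIM (what is proved, stated in full; the proofs are below) =====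
def Claim_equal_ReverseOneHotEncoding : Prop := ∀ (t : List Int), Dom_ReverseOneHotEncoding t → Pre_ReverseOneHotEncoding t → Spec_ReverseOneHotEncoding t (ReverseOneHotEncoding t)

-- ===== LEMMAS AND PROOFS =====

-- proof-only model of A's fused loop: list of remaining values, current index, state (max, argmax)
def loopA : List Int → Int → Int × Int → Int × Int
  | [], _, s => s
  | v :: l, i, s => loopA l (i + 1) (if v > s.1 then (v, i) else s)

-- A's foldl over range(a, a+n) reading t[j] is loopA over the corresponding slice of t
lemma foldA_gen (n : Nat) : ∀ (a : Nat) (t : List Int) (s : Int × Int), a + n ≤ t.length →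
    (PySem.List.pyRange (a : Int) ((a : Int) + (n : Int)) 1).foldl
      (fun (s : Int × Int) j =>
        let v := PySem.List.pyGetD t j 0
        if v > s.1 then (v, j) else s) s
    = loopA ((t.drop a).take n) (a : Int) s := by
  induction n with
  | zero =>
    intro a t s _
    simp [PySem.List.pyRange_one_eq_nil, loopA]
  | succ n ih =>
    intro a t s h
    have ha : a < t.length := by omega
    have hcons : PySem.List.pyRange (a : Int) ((a : Int) + ((n : Int) + 1)) 1
        = (a : Int) :: PySem.List.pyRange ((a : Int) + 1) ((a : Int) + ((n : Int) + 1)) 1 :=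
      PySem.List.pyRange_one_cons (by omega)
    have hdrop : t.drop a = t[a] :: t.drop (a + 1) := List.drop_eq_getElem_cons ha
    have hget : PySem.List.pyGetD t (a : Int) 0 = t[a] := by
      simpa using PySem.List.pyGetD_natCast (xs := t) (n := a) (d := 0) |>.trans (List.getD_eq_getElem t 0 ha)
    have ih' := ih (a + 1) t (if t[a] > s.1 then (t[a], (a : Int)) else s) (by omega)
    push_cast at hcons ih' ⊢
    rw [hcons]
    simp only [List.foldl_cons, hget]
    rw [hdrop]
    simp only [List.take_succ_cons, loopA]
    convert ih' using 2
    ring_nf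

-- the running max never drops below its seed
lemma seed_le_foldl_max : ∀ (l : List Int) (m : Int), m ≤ l.foldl max m := by
  intro l
  induction l with
  | nil => intro m; simp
  | cons v l ih => intro m; exact le_trans (le_max_left m v) (ih (max m v))

-- the fused loop's final index: the seed index if nothing beats the seed,
-- else the offset of the first occurrence of the final max
lemma loopA_snd : ∀ (l : List Int) (m j : Int) (i : Int),
    (loopA l i (m, j)).2 =
      if l.foldl max m > m then i + (l.idxOf (l.foldl max m) : Int) else j := by
  intro l
  induction l with
  | nil =>
    intro m j i
    simp [loopA]
  | cons v l ih =>
    intro m j i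
    simp only [loopA, List.foldl_cons]
    by_cases hv : v > m
    · rw [if_pos hv]
      have hmax : max m v = v := by omega
      rw [hmax, ih]
      have hle := seed_le_foldl_max l v
      by_cases hM : l.foldl max v > v
      · have hne : v ≠ l.foldl max v := by omega
        rw [if_pos hM, if_pos (show l.foldl max v > m by omega), List.idxOf_cons_ne _ hne]
        push_cast; ring
      · have hMv : l.foldl max v = v := by omega
        rw [if_neg hM, hMv, if_pos hv, List.idxOf_cons_self]
        simp
    · rw [if_neg hv]
      have hmax : max m v = m := by omega
      rw [hmax, ih]
      by_cases hM : l.foldl max m > m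
      · have hne : v ≠ l.foldl max m := by omega
        rw [if_pos hM, if_pos hM, List.idxOf_cons_ne _ hne]
        push_cast; ring
      · rw [if_neg hM, if_neg hM]

-- max of a nonempty list, seed = head
def mxl : List Int → Int
  | [] => 0
  | v :: l => l.foldl max v

lemma foldl_max_pull : ∀ (l : List Int) (a b : Int),
    l.foldl max (max a b) = max a (l.foldl max b) := by
  intro l
  induction l with
  | nil => intro a b; rfl
  | cons c l ih =>
    intro a b
    simp only [List.foldl_cons]
    rw [max_assoc, ih]

lemma mxl_append (l₁ l₂ : List Int) (h₁ : l₁ ≠ []) (h₂ : l₂ ≠ []) :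
    mxl (l₁ ++ l₂) = max (mxl l₁) (mxl l₂) := by
  cases l₁ with
  | nil => exact absurd rfl h₁
  | cons v l =>
    cases l₂ with
    | nil => exact absurd rfl h₂
    | cons w l' =>
      simp only [mxl, List.cons_append, List.foldl_append, List.foldl_cons]
      rw [foldl_max_pull l' (l.foldl max v) w]

lemma mem_le_mxl : ∀ (l : List Int) (x : Int), x ∈ l → x ≤ mxl l := by
  intro l
  induction l with
  | nil => intro x h; simp at h
  | cons v l ih =>
    intro x h
    simp only [mxl]
    rcases List.mem_cons.mp h with rfl | h
    · exact seed_le_foldl_max l x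
    · by_cases hl : l = []
      · subst hl; simp at h
      · cases l with
        | nil => simp at h
        | cons w l' =>
          have := ih x h
          simp only [mxl] at this
          calc x ≤ l'.foldl max w := this
            _ ≤ (w :: l').foldl max v := by
                simp only [List.foldl_cons]
                have : l'.foldl max (max v w) = max v (l'.foldl max w) := foldl_max_pull l' v w
                omega

lemma mxl_mem : ∀ (l : List Int), l ≠ [] → mxl l ∈ l := by
  intro l
  induction l with
  | nil => intro h; exact absurd rfl h
  | cons v l ih =>
    intro _
    cases l with
    | nil => simp [mxl]
    | cons w l' =>
      have hmem := ih (by simp)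
      simp only [mxl, List.foldl_cons] at *
      rw [foldl_max_pull l' v w]
      by_cases hv : l'.foldl max w ≤ v
      · rw [max_eq_left hv]; exact List.mem_cons_self
      · rw [max_eq_right (by omega)]
        exact List.mem_cons_of_mem _ hmem

-- idxOf in an append: first list wins when the element is there
lemma idxOf_append_mem : ∀ (l₁ l₂ : List Int) (x : Int), x ∈ l₁ →
    List.idxOf x (l₁ ++ l₂) = List.idxOf x l₁ := by
  intro l₁
  induction l₁ with
  | nil => intro l₂ x h; simp at h
  | cons v l ih =>
    intro l₂ x h
    by_cases hv : v = x
    · subst hv; simp [List.idxOf_cons_self]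
    · have hx : x ∈ l := by
        rcases List.mem_cons.mp h with h' | h'
        · exact absurd h'.symm hv
        · exact h'
      simp only [List.cons_append, List.idxOf_cons_ne _ hv, ih l₂ x hx]

lemma idxOf_append_not_mem : ∀ (l₁ l₂ : List Int) (x : Int), x ∉ l₁ →
    List.idxOf x (l₁ ++ l₂) = l₁.length + List.idxOf x l₂ := by
  intro l₁
  induction l₁ with
  | nil => intro l₂ x _; simp
  | cons v l ih =>
    intro l₂ x h
    have hv : v ≠ x := fun he => h (he ▸ List.mem_cons_self)
    have hx : x ∉ l := fun hm => h (List.mem_cons_of_mem _ hm)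
    simp only [List.cons_append, List.idxOf_cons_ne _ hv, ih l₂ x hx, List.length_cons]
    omega

-- characterisation of B's tournament: on [lo, hi) with lo < hi ≤ |t| it returns
-- the slice's max and (lo + offset of its first occurrence in the slice)
lemma pvBest_spec : ∀ (n lo hi : Nat) (t : List Int), hi - lo = n → lo < hi → hi ≤ t.length →
    pvBest t lo hi =
      (mxl ((t.drop lo).take (hi - lo)),
       (lo : Int) + (List.idxOf (mxl ((t.drop lo).take (hi - lo))) ((t.drop lo).take (hi - lo)) : Int)) := by
  intro n
  induction n using Nat.strong_induction_on with
  | _ n ih =>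
    intro lo hi t hn hlt hle
    rcases Nat.lt_or_ge n 2 with hsmall | hbig
    · -- hi - lo = 1
      have h1 : hi - lo = 1 := by omega
      have hlo : lo < t.length := by omega
      have hdrop : t.drop lo = t[lo] :: t.drop (lo + 1) := List.drop_eq_getElem_cons hlo
      have hget : PySem.List.pyGetD t (lo : Int) 0 = t[lo] := by
        simpa using PySem.List.pyGetD_natCast (xs := t) (n := lo) (d := 0) |>.trans (List.getD_eq_getElem t 0 hlo)
      have hslice : (t.drop lo).take (hi - lo) = [t[lo]] := by
        rw [h1, hdrop]; rfl
      rw [pvBest, if_pos (by omega), hslice]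
      simp [mxl, hget]
    · -- split at mid
      have h2 : 2 ≤ hi - lo := by omega
      set mid := (lo + hi) / 2 with hmid
      have hm1 : lo < mid := by omega
      have hm2 : mid < hi := by omega
      have hL := ih (mid - lo) (by omega) lo mid t rfl hm1 (by omega)
      have hR := ih (hi - mid) (by omega) mid hi t rfl hm2 hle
      rw [pvBest, if_neg (by omega)]
      simp only [← hmid, hL, hR]
      set v1 := (t.drop lo).take (mid - lo) with hv1
      set v2 := (t.drop mid).take (hi - mid) with hv2
      have hlen1 : v1.length = mid - lo := by
        rw [hv1, List.length_take, List.length_drop]; omega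
      have hne1 : v1 ≠ [] := by
        intro h; rw [h] at hlen1; simp at hlen1; omega
      have hlen2 : v2.length = hi - mid := by
        rw [hv2, List.length_take, List.length_drop]; omega
      have hne2 : v2 ≠ [] := by
        intro h; rw [h] at hlen2; simp at hlen2; omega
      have hsplit : (t.drop lo).take (hi - lo) = v1 ++ v2 := by
        rw [hv1, hv2]
        have : hi - lo = (mid - lo) + (hi - mid) := by omega
        rw [this, List.take_add]
        congr 2
        rw [List.drop_drop]
        congr 1
        omega
      rw [hsplit, mxl_append v1 v2 hne1 hne2]
      by_cases hge : mxl v1 ≥ mxl v2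
      · rw [if_pos (by exact hge)]
        have hmax : max (mxl v1) (mxl v2) = mxl v1 := max_eq_left hge
        rw [hmax, idxOf_append_mem v1 v2 _ (mxl_mem v1 hne1)]
      · rw [if_neg hge]
        have hmax : max (mxl v1) (mxl v2) = mxl v2 := max_eq_right (by omega)
        have hnm : mxl v2 ∉ v1 := by
          intro hmem
          have := mem_le_mxl v1 _ hmem
          omega
        rw [hmax, idxOf_append_not_mem v1 v2 _ hnm, hlen1]
        congr 1
        push_cast
        omega

-- ===== VERDICT (by name: the statement is the Claim_ definition above) =====
theorem ReverseOneHotEncoding_spec : Claim_equal_ReverseOneHotEncoding := by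
  intro t _ hpre
  unfold Spec_ReverseOneHotEncoding ReverseOneHotEncoding ReverseOneHotEncoding_alt
  have hlen : 10 ≤ t.length := hpre
  obtain ⟨v0, t', rfl⟩ : ∃ v0 t', t = v0 :: t' := by
    cases t with
    | nil => simp at hlen
    | cons a l => exact ⟨a, l, rfl⟩
  -- A's side: loopA over the 10-element slice
  have hA := foldA_gen 10 0 (v0 :: t') (PySem.List.pyGetD (v0 :: t') 0 0, 0) (by simpa using hlen)
  simp only [Nat.cast_zero, Nat.cast_ofNat, zero_add] at hA
  rw [hA]
  -- B's side: the tournament characterisation on [0, 10)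
  have hB := pvBest_spec 10 0 10 (v0 :: t') rfl (by omega) (by simpa using hlen)
  rw [hB]
  simp only [List.drop_zero] at *
  have hvals : (v0 :: t').take 10 = v0 :: t'.take 9 := by
    simp [List.take_succ_cons]
  have hv0 : PySem.List.pyGetD (v0 :: t') 0 0 = v0 := by
    rw [PySem.List.pyGetD_zero]; rfl
  rw [hvals, hv0]
  set rest := t'.take 9 with hrest
  -- unfold the i = 0 step of loopA: the comparison v0 > v0 is false
  simp only [loopA, gt_iff_lt, lt_irrefl, if_false]
  rw [loopA_snd]
  have hseed := seed_le_foldl_max rest v0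
  simp only [mxl]
  by_cases hgt : rest.foldl max v0 > v0
  · rw [if_pos hgt]
    have hne : v0 ≠ rest.foldl max v0 := by omega
    rw [List.idxOf_cons_ne _ hne]
    push_cast
    ring
  · rw [if_neg hgt]
    have heq : rest.foldl max v0 = v0 := by omega
    rw [heq, List.idxOf_cons_self]
    simp
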